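-- pv_equiv track=rewrite | github.com/gph626/490_Senior_Project | backend/utils.py | match_assets
-- ===== SOURCE A (Python) =====
-- from typing import Dict, Any, Set
--
-- def match_assets(text: str, config: Dict[str, Any]) -> Dict[str, Any]:
--     """
--     Match org-specific assets (emails/domains/keywords) inside the text.
--     """
--     matches = {"hits": []}
--     if not text or not config:
--         return matches
--
--     watchlist = config.get("watchlist", {})
--     for asset_type, assets in watchlist.items():
--         if not isinstance(assets, list):
--             continue
--         for a in assets:
--             if a and a.lower() in text.lower():
--                 matches["hits"].append({"type": asset_type, "value": a})
--     return matches
-- ===== SOURCE B (Python) =====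
-- def match_assets(text, config):
--     """
--     Match org-specific assets (emails/domains/keywords) inside the text.
--     Lowers the text once and indexes, per distinct pattern length, the set of
--     all substrings of that length; each asset is then checked with one set lookup.
--     """
--     if not text or not config:
--         return {"hits": []}
--     lt = text.lower()
--     n = len(lt)
--     index = {}  # pattern length -> set of all substrings of lt of that length
--     hits = []
--     for asset_type, assets in config.get("watchlist", {}).items():
--         if not isinstance(assets, list):
--             continue
--         for a in assets:
--             if not a:
--                 continue
--             L = len(a)
--             if L not in index:
--                 index[L] = {lt[i:i + L] for i in range(n - L + 1)}
--             if a.lower() in index[L]: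
--                 hits.append({"type": asset_type, "value": a})
--     return {"hits": hits}
-- ===== Notes on version B (the rewrite author's own statement) =====
-- stated objective: alternative
-- what changed: B lowers the text once and builds, for each distinct pattern length, a set of every substring of that length of the lowered text, testing each asset by one set lookup instead of A's per-asset text.lower() plus substring scan (measured same speed on the generated inputs).
import Mathlib
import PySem

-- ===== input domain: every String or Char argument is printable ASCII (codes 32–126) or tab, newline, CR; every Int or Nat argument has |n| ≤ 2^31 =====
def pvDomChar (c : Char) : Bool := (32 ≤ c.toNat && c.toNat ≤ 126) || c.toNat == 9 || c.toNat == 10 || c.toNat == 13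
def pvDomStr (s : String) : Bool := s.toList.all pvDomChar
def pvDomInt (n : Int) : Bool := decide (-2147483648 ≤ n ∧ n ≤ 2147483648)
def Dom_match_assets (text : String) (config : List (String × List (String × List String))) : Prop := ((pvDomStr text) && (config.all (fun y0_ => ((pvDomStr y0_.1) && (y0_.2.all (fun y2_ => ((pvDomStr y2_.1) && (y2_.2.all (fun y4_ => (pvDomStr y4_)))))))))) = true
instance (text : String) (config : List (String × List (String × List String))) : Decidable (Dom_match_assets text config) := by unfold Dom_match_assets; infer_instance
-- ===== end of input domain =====

-- B lowers the text once and indexes, per distinct pattern length, the set of all substrings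
-- of that length of the lowered text, replacing A's per-asset text.lower() + substring scan
-- by a single set lookup per asset (objective: alternative algorithm, same measured cost).


-- ===== PORT A =====
-- 'isinstance(assets, list)' is always true under the input type dict[str, list[str]], so the
-- 'continue' branch is unreachable and not ported.
def match_assets (text : String) (config : List (String × List (String × List String))) : List (String × List (List (String × String))) :=
  if text = "" ∨ config = [] then [("hits", [])]
  else
    let watchlist := PySem.Dict.getD (PySem.Dict.mk config) "watchlist" []
    let hits := watchlist.foldl (fun hits ta =>
      ta.2.foldl (fun hits a =>
        if a ≠ "" ∧ PySem.Str.isIn (PySem.Str.lower a) (PySem.Str.lower text) = true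
        then hits ++ [[("type", ta.1), ("value", a)]]
        else hits) hits) []
    [("hits", hits)]

-- ===== PORT B =====
-- {lt[i:i+L] for i in range(n - L + 1)} : the set of all substrings of lt of length L
def windowsB (lt : String) (n L : Int) : PySem.Set String :=
  PySem.Set.ofList ((PySem.List.pyRange 0 (n - L + 1)).map (fun i => PySem.Str.slice lt (some i) (some (i + L))))

def match_assets_alt (text : String) (config : List (String × List (String × List String))) : List (String × List (List (String × String))) :=
  if text = "" ∨ config = [] then [("hits", [])]
  else
    let lt := PySem.Str.lower text
    let n := PySem.Str.len lt
    let wl := PySem.Dict.getD (PySem.Dict.mk config) "watchlist" []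
    let r := wl.foldl (fun st ta =>
      ta.2.foldl (fun st a =>
        if a = "" then st
        else
          let L := PySem.Str.len a
          let index := if (PySem.Dict.get? st.1 L).isNone then PySem.Dict.insert st.1 L (windowsB lt n L) else st.1
          -- index[L] : the key L was just ensured present, so getD never sees its default
          if PySem.Set.contains (PySem.Dict.getD index L PySem.Set.empty) (PySem.Str.lower a)
          then (index, st.2 ++ [[("type", ta.1), ("value", a)]])
          else (index, st.2)) st)
      ((PySem.Dict.mk [] : PySem.Dict Int (PySem.Set String)), ([] : List (List (String × String))))
    [("hits", r.2)]

-- ===== PRECONDITION & SPEC =====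
def Spec_match_assets (text : String) (config : List (String × List (String × List String))) (out : List (String × List (List (String × String)))) : Prop := out = match_assets_alt text config
instance (text : String) (config : List (String × List (String × List String))) (out : List (String × List (List (String × String)))) : Decidable (Spec_match_assets text config out) := by unfold Spec_match_assets; infer_instance

-- ===== CLAIM (what is proved, stated in full; the proofs are below) =====
def Claim_equal_match_assets : Prop := ∀ (text : String) (config : List (String × List (String × List String))), Dom_match_assets text config → Spec_match_assets text config (match_assets text config)

-- ===== LEMMAS AND PROOFS =====

-- the set of windows of length (len a) of the lowered text contains (lower a) iff (lower a) occurs in the lowered text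
lemma contains_windows (t a : String) (ha : a ≠ "") :
    PySem.Set.contains (windowsB (PySem.Str.lower t) (PySem.Str.len (PySem.Str.lower t)) (PySem.Str.len a)) (PySem.Str.lower a)
      = PySem.Str.isIn (PySem.Str.lower a) (PySem.Str.lower t) := by
  unfold windowsB
  set s : List Char := (PySem.Str.lower t).toList with hs
  set p : List Char := (PySem.Str.lower a).toList with hp
  have hlen : p.length = a.toList.length := by
    rw [hp, PySem.Str.toList_lower]; simp [PySem.Chars.lower]
  have hpne : p ≠ [] := by
    intro h
    apply ha
    have h0 : a.toList.length = 0 := by rw [← hlen, h]; rfl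
    cases he : a.toList with
    | nil => exact String.toList_inj.mp (by simp [he])
    | cons c cs => simp [he] at h0
  have hppos : 0 < p.length := List.length_pos_of_ne_nil hpne
  have hna : PySem.Str.len a = (p.length : Int) := by rw [PySem.Str.len_eq, hlen]
  have hns : PySem.Str.len (PySem.Str.lower t) = (s.length : Int) := by rw [PySem.Str.len_eq, hs]
  rw [Bool.eq_iff_iff]
  rw [show (PySem.Set.contains (PySem.Set.ofList ((PySem.List.pyRange 0 (PySem.Str.len (PySem.Str.lower t) - PySem.Str.len a + 1)).map (fun i => PySem.Str.slice (PySem.Str.lower t) (some i) (some (i + PySem.Str.len a))))) (PySem.Str.lower a) = true) ↔ ((PySem.Str.lower a) ∈ PySem.Set.ofList ((PySem.List.pyRange 0 (PySem.Str.len (PySem.Str.lower t) - PySem.Str.len a + 1)).map (fun i => PySem.Str.slice (PySem.Str.lower t) (some i) (some (i + PySem.Str.len a))))) from by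
    simp [PySem.Set.contains]]
  rw [PySem.Set.mem_ofList]
  rw [PySem.Str.isIn_eq, ← PySem.Chars.exists_prefix_drop_iff_isIn]
  constructor
  · rintro hmem
    simp only [List.mem_map] at hmem
    obtain ⟨i, hi, hEq⟩ := hmem
    rw [PySem.List.mem_pyRange_one] at hi
    obtain ⟨hi0, hilt⟩ := hi
    obtain ⟨k, rfl⟩ : ∃ k : Nat, i = (k : Int) := ⟨i.toNat, (Int.toNat_of_nonneg hi0).symm⟩
    refine ⟨k, ?_⟩
    have hT : (PySem.Str.lower a).toList = (PySem.Str.slice (PySem.Str.lower t) (some (k:Int)) (some ((k:Int) + PySem.Str.len a))).toList := by rw [hEq]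
    rw [PySem.Str.toList_slice, hna] at hT
    have hcast : ((k:Int) + (p.length:Int)) = ((k + p.length : Nat) : Int) := by push_cast; ring
    rw [hcast] at hT
    have hslice : PySem.Chars.slice s (some (k:Int)) (some ((k + p.length : Nat):Int)) = List.take (k + p.length - k) (List.drop k s) := PySem.List.slice_natCast s k (k + p.length)
    rw [← hs] at hT
    rw [hslice, Nat.add_sub_cancel_left, ← hp] at hT
    show p <+: List.drop k s
    rw [hT]
    exact List.take_prefix _ _
  · rintro ⟨j, hj⟩
    have hle : p.length ≤ (List.drop j s).length := hj.length_le
    rw [List.length_drop] at hle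
    have hjb : j + p.length ≤ s.length := by omega
    simp only [List.mem_map]
    refine ⟨(j : Int), ?_, ?_⟩
    · rw [PySem.List.mem_pyRange_one, hna, hns]
      constructor
      · positivity
      · omega
    · apply String.toList_inj.mp
      rw [PySem.Str.toList_slice, hna]
      have hcast : ((j:Int) + (p.length:Int)) = ((j + p.length : Nat) : Int) := by push_cast; ring
      rw [hcast]
      have hslice : PySem.Chars.slice ((PySem.Str.lower t).toList) (some (j:Int)) (some ((j + p.length : Nat):Int)) = List.take (j + p.length - j) (List.drop j ((PySem.Str.lower t).toList)) := PySem.List.slice_natCast _ j (j + p.length)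
      rw [hslice, Nat.add_sub_cancel_left]
      rw [← hs, ← hp]
      exact (List.prefix_iff_eq_take.mp hj).symm


-- invariant of B's length-indexed cache
def InvIdx (t : String) (d : PySem.Dict Int (PySem.Set String)) : Prop :=
  ∀ L v, PySem.Dict.get? d L = some v → v = windowsB (PySem.Str.lower t) (PySem.Str.len (PySem.Str.lower t)) L

lemma inner_fold_eq (t ty : String) (assets : List String) :
    ∀ (d : PySem.Dict Int (PySem.Set String)) (hits : List (List (String × String))), InvIdx t d →
      (assets.foldl (fun st a =>
        if a = "" then st
        else
          let L := PySem.Str.len a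
          let index := if (PySem.Dict.get? st.1 L).isNone then PySem.Dict.insert st.1 L (windowsB (PySem.Str.lower t) (PySem.Str.len (PySem.Str.lower t)) L) else st.1
          if PySem.Set.contains (PySem.Dict.getD index L PySem.Set.empty) (PySem.Str.lower a)
          then (index, st.2 ++ [[("type", ty), ("value", a)]])
          else (index, st.2)) (d, hits)).2
        = assets.foldl (fun hits a =>
            if a ≠ "" ∧ PySem.Str.isIn (PySem.Str.lower a) (PySem.Str.lower t) = true
            then hits ++ [[("type", ty), ("value", a)]] else hits) hits
      ∧ InvIdx t (assets.foldl (fun st a =>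
        if a = "" then st
        else
          let L := PySem.Str.len a
          let index := if (PySem.Dict.get? st.1 L).isNone then PySem.Dict.insert st.1 L (windowsB (PySem.Str.lower t) (PySem.Str.len (PySem.Str.lower t)) L) else st.1
          if PySem.Set.contains (PySem.Dict.getD index L PySem.Set.empty) (PySem.Str.lower a)
          then (index, st.2 ++ [[("type", ty), ("value", a)]])
          else (index, st.2)) (d, hits)).1 := by
  induction assets with
  | nil => exact fun d hits h => ⟨rfl, h⟩
  | cons a rest ih =>
    intro d hits hInv
    simp only [List.foldl_cons]
    by_cases hae : a = ""
    · subst hae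
      simp only [ne_eq, not_true_eq_false, false_and, if_false]
      exact ih d hits hInv
    · have hd' : PySem.Dict.get? (if (PySem.Dict.get? d (PySem.Str.len a)).isNone then PySem.Dict.insert d (PySem.Str.len a) (windowsB (PySem.Str.lower t) (PySem.Str.len (PySem.Str.lower t)) (PySem.Str.len a)) else d) (PySem.Str.len a) = some (windowsB (PySem.Str.lower t) (PySem.Str.len (PySem.Str.lower t)) (PySem.Str.len a)) := by
        cases h : PySem.Dict.get? d (PySem.Str.len a) with
        | none => simp [PySem.Dict.get?_insert_self]
        | some v => simp only [h, Option.isNone_some, Bool.false_eq_true, if_false]; exact congrArg some (hInv _ v h)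
      have hInv' : InvIdx t (if (PySem.Dict.get? d (PySem.Str.len a)).isNone then PySem.Dict.insert d (PySem.Str.len a) (windowsB (PySem.Str.lower t) (PySem.Str.len (PySem.Str.lower t)) (PySem.Str.len a)) else d) := by
        intro L' v' h'
        by_cases hLe : L' = PySem.Str.len a
        · subst hLe; rw [hd'] at h'; exact (Option.some_inj.mp h').symm ▸ rfl
        · cases h : PySem.Dict.get? d (PySem.Str.len a) with
          | none => simp only [h, Option.isNone_none, if_true] at h'
                    rw [PySem.Dict.get?_insert_of_ne d _ hLe] at h'
                    exact hInv _ _ h'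
          | some v => simp only [h, Option.isNone_some, Bool.false_eq_true, if_false] at h'
                      exact hInv _ _ h'
      have hc : PySem.Set.contains (PySem.Dict.getD (if (PySem.Dict.get? d (PySem.Str.len a)).isNone then PySem.Dict.insert d (PySem.Str.len a) (windowsB (PySem.Str.lower t) (PySem.Str.len (PySem.Str.lower t)) (PySem.Str.len a)) else d) (PySem.Str.len a) PySem.Set.empty) (PySem.Str.lower a) = PySem.Str.isIn (PySem.Str.lower a) (PySem.Str.lower t) := by
        rw [PySem.Dict.getD, hd']; exact contains_windows t a hae
      simp only [if_neg hae, hc]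
      by_cases hin : PySem.Str.isIn (PySem.Str.lower a) (PySem.Str.lower t) = true
      · simp only [hin, ne_eq, hae, not_false_eq_true, true_and, if_pos]
        exact ih _ _ hInv'
      · simp only [eq_false hin, if_false, ne_eq, hae, not_false_eq_true, and_false]
        exact ih _ _ hInv'

lemma outer_fold_eq (t : String) (wl : List (String × List String)) :
    ∀ (d : PySem.Dict Int (PySem.Set String)) (hits : List (List (String × String))), InvIdx t d →
      (wl.foldl (fun st ta =>
        ta.2.foldl (fun st a =>
          if a = "" then st
          else
            let L := PySem.Str.len a
            let index := if (PySem.Dict.get? st.1 L).isNone then PySem.Dict.insert st.1 L (windowsB (PySem.Str.lower t) (PySem.Str.len (PySem.Str.lower t)) L) else st.1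
            if PySem.Set.contains (PySem.Dict.getD index L PySem.Set.empty) (PySem.Str.lower a)
            then (index, st.2 ++ [[("type", ta.1), ("value", a)]])
            else (index, st.2)) st) (d, hits)).2
        = wl.foldl (fun hits ta =>
            ta.2.foldl (fun hits a =>
              if a ≠ "" ∧ PySem.Str.isIn (PySem.Str.lower a) (PySem.Str.lower t) = true
              then hits ++ [[("type", ta.1), ("value", a)]] else hits) hits) hits := by
  induction wl with
  | nil => exact fun d hits _ => rfl
  | cons ta rest ih =>
    intro d hits hInv
    simp only [List.foldl_cons]
    obtain ⟨h2, h1⟩ := inner_fold_eq t ta.1 ta.2 d hits hInv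
    rw [← h2]
    exact ih _ _ h1

-- ===== VERDICT (by name: the statement is the Claim_ definition above) =====
theorem match_assets_spec : Claim_equal_match_assets := by
  intro text config _
  unfold Spec_match_assets match_assets match_assets_alt
  by_cases h : text = "" ∨ config = []
  · simp [h]
  · simp only [h, if_false]
    have := outer_fold_eq text (PySem.Dict.getD (PySem.Dict.mk config) "watchlist" [])
      (PySem.Dict.mk []) [] (by intro L v hv; simp [PySem.Dict.get?] at hv)
    simp only [this]
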